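-- pv_equiv track=rewrite | github.com/avertiz/AoC | 2024/day5/solution_pt1.py | create_order
-- ===== SOURCE A (Python) =====
-- def create_order(rules:list)->dict:
--     index = {}
--     for rule in rules:
--         r1 = rule[0]
--         r2 = rule[1]
--
--         if r2 in index.keys():
--             index[r2].append(r1)
--         else:
--             index[r2] = [r1]
--
--     return(index)
-- ===== SOURCE B (Python) =====
-- def create_order(rules: list) -> dict:
--     # Key-major two-pass: distinct second elements in first-occurrence order,
--     # then one comprehension per key collecting the first elements.
--     keys = list(dict.fromkeys(rule[1] for rule in rules))
--     return {k: [rule[0] for rule in rules if rule[1] == k] for k in keys}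
-- ===== Notes on version B (the rewrite author's own statement) =====
-- stated objective: alternative
-- what changed: Replaces the single-pass dict insertion with a key-major two-pass: build the distinct second elements in first-occurrence order via dict.fromkeys, then collect the first elements for each key with one comprehension per key.
import Mathlib
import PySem

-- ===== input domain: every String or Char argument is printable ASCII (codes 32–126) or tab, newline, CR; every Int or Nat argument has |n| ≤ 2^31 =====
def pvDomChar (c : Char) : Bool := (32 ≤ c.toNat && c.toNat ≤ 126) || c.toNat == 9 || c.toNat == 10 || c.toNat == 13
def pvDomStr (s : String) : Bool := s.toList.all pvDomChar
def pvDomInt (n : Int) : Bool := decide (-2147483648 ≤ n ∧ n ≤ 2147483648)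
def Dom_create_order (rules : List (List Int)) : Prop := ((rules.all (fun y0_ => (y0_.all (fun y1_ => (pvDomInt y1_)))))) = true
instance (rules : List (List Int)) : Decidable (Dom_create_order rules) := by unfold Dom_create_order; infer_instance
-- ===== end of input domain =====

-- B replaces A's single-pass dict insertion by a key-major two-pass (ordered dedup of the
-- second elements, then one collecting pass per key); objective: alternative decomposition.


-- ===== PORT A =====
def create_order (rules : List (List Int)) : List (Int × List Int) :=
  (rules.foldl (fun index rule =>
      let r1 := (PySem.List.pyGet? rule 0).getD 0
      let r2 := (PySem.List.pyGet? rule 1).getD 0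
      if index.contains r2 then index.modify r2 [] (fun l => l ++ [r1])
      else index.insert r2 [r1])
    PySem.Dict.empty).items

-- ===== PORT B =====
def create_order_alt (rules : List (List Int)) : List (Int × List Int) :=
  let keys := PySem.List.dedup (rules.map (fun rule => (PySem.List.pyGet? rule 1).getD 0))
  keys.map (fun k =>
    (k, (rules.filter (fun rule => (PySem.List.pyGet? rule 1).getD 0 == k)).map
          (fun rule => (PySem.List.pyGet? rule 0).getD 0)))

-- ===== PRECONDITION & SPEC =====
-- Pre_ excludes exactly the inputs on which Python A raises IndexError: a rule with fewer than 2 elements.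
def Pre_create_order (rules : List (List Int)) : Prop := ∀ r ∈ rules, 2 ≤ r.length
instance (rules : List (List Int)) : Decidable (Pre_create_order rules) := by unfold Pre_create_order; infer_instance
def pvWitness_create_order : List (List Int) := [[1, 2], [3, 2], [4, 5]]

def Spec_create_order (rules : List (List Int)) (out : List (Int × List Int)) : Prop := out = create_order_alt rules
instance (rules : List (List Int)) (out : List (Int × List Int)) : Decidable (Spec_create_order rules out) := by unfold Spec_create_order; infer_instance

-- ===== CLAIM (what is proved, stated in full; the proofs are below) =====
def Claim_equal_create_order : Prop := ∀ (rules : List (List Int)), Dom_create_order rules → Pre_create_order rules → Spec_create_order rules (create_order rules)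

-- ===== LEMMAS AND PROOFS =====

-- second element of a rule (the dict key) and first element (the collected value)
def pvKey (rule : List Int) : Int := (PySem.List.pyGet? rule 1).getD 0
def pvVal (rule : List Int) : Int := (PySem.List.pyGet? rule 0).getD 0

-- A's loop body is exactly one `modify` with default [] (insert of a fresh key appends).
lemma stepA_eq_modify (d : PySem.Dict Int (List Int)) (r : List Int) :
    (if d.contains (pvKey r) then d.modify (pvKey r) [] (fun l => l ++ [pvVal r])
     else d.insert (pvKey r) [pvVal r])
    = d.modify (pvKey r) [] (fun l => l ++ [pvVal r]) := by
  cases hc : d.contains (pvKey r)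
  · simp [PySem.Dict.modify, PySem.Dict.getD_of_not_contains (h := hc)]
  · simp

lemma create_order_eq_pairs_fold (rules : List (List Int)) :
    create_order rules =
      ((rules.map (fun r => (pvKey r, pvVal r))).foldl
        (fun d p => d.modify p.1 [] (fun l => l ++ [p.2])) PySem.Dict.empty).items := by
  unfold create_order
  rw [List.foldl_map]
  congr 1
  apply PySem.List.foldl_congr_mem
  intro d r _
  simpa [pvKey, pvVal] using stepA_eq_modify d r

theorem create_order_spec : Claim_equal_create_order := by
  intro rules _ _
  unfold Spec_create_order create_order_alt
  rw [create_order_eq_pairs_fold]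
  set pairs : List (Int × Int) := rules.map (fun r => (pvKey r, pvVal r)) with hpairs
  set d : PySem.Dict Int (List Int) :=
    pairs.foldl (fun d p => d.modify p.1 [] (fun l => l ++ [p.2])) PySem.Dict.empty with hd
  have hnodup : d.keys.Nodup := by
    rw [hd]
    exact PySem.Dict.nodup_keys_foldl_modify_key pairs Prod.fst [] (fun _ p => fun l => l ++ [p.2])
      PySem.Dict.empty (by simp)
  have hkeys : d.keys = PySem.Set.ofList (rules.map pvKey) := by
    rw [hd]
    rw [PySem.Dict.keys_foldl_modify_key]
    simp [hpairs, PySem.Set.update, PySem.Set.ofList, List.foldl_map]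
  have hget : ∀ k : Int, d.getD k [] =
      (rules.filter (fun r => pvKey r == k)).map pvVal := by
    intro k
    rw [hd, PySem.Dict.getD_foldl_modify_append]
    simp [hpairs, List.filter_map, Function.comp_def, pvKey, pvVal]
  rw [PySem.Dict.items_eq_map_keys d hnodup [], hkeys]
  have hdedup : PySem.List.dedup (rules.map (fun rule => (PySem.List.pyGet? rule 1).getD 0))
      = PySem.Set.ofList (rules.map pvKey) := by
    unfold pvKey
    simp [pysem]
  rw [← hdedup]
  exact List.map_congr_left (fun k _ => by rw [hget k]; simp [pvKey, pvVal])
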